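-- pv_equiv track=rewrite | github.com/trungpro5398/Competitive-programming | CP problems/Assignment_3_QuangTrungNguyen_30936179/q3/mybunzip.py | decodeFibonacciWord
-- ===== SOURCE A (Python) =====
-- import copy
--
-- def decodeFibonacciWord(s, l):
--     # this code will return the binary string to number in linear time
--     # it will get the string s and l index
--     a = 1
--     b = 2
--     lenWord = 0
--     # it will run until s[l] == s[l+1] == "1". It is easy to see that
--     # Fibonacci code words always have the same last 2 digits and are equal to 1
--     while not (s[l] == s[l + 1] and s[l] == "1"):
--         # it will plus to the lenWord if s[l] == "1"
--         if s[l] == "1":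
--             lenWord += a
--         c = a + b
--         a = copy.deepcopy(b)
--         b = c
--         l += 1
--     l += 2
--     lenWord += a
--     # return new l index and the number
--     return l, lenWord
-- ===== SOURCE B (Python) =====
-- def decodeFibonacciWord(s, l):
--     # scan forward for the "11" terminator first
--     j = l
--     while not (s[j] == "1" and s[j + 1] == "1"):
--         j += 1
--     # precompute the Fibonacci weights 1, 2, 3, 5, ... for positions l..j
--     fibs = [1, 2]
--     while len(fibs) < j - l + 1:
--         fibs.append(fibs[-1] + fibs[-2])
--     total = sum(fibs[k - l] for k in range(l, j + 1) if s[k] == "1")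
--     return j + 2, total
-- ===== Notes on version B (the rewrite author's own statement) =====
-- stated objective: simpler
-- what changed: B replaces A's single loop with rolling Fibonacci state (and copy.deepcopy) by a terminator scan, a precomputed Fibonacci weight table, and a sum comprehension over the '1' positions.
import Mathlib
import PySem

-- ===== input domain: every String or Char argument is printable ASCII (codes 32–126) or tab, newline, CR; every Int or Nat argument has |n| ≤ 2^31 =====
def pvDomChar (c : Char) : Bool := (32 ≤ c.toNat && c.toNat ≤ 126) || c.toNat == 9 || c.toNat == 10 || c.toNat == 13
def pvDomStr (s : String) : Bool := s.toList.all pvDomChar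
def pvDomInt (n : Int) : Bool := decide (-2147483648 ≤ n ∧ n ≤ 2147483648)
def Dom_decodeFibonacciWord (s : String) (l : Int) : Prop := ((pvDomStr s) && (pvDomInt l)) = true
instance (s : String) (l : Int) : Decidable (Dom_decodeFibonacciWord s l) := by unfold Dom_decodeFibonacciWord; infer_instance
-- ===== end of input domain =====

-- B replaces A's single rolling-state loop by a terminator scan, a precomputed Fibonacci
-- weight table and a sum over the positions l..j (objective: simpler; drops copy.deepcopy).

-- ===== PORT A =====
-- A's while loop; fuel bounds the iterations (inside Pre_ the loop stops before the fuel
-- runs out); an out-of-range access, where Python raises IndexError (excluded by Pre_),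
-- returns the junk value (0, 0)
def pvLoopA (cs : List Char) (l a b w : Int) : Nat → Int × Int
  | 0 => (0, 0)
  | fuel + 1 =>
    match PySem.List.pyGet? cs l, PySem.List.pyGet? cs (l + 1) with
    | some c0, some c1 =>
      if c0 = c1 ∧ c0 = '1' then (l + 2, w + a)
      else pvLoopA cs (l + 1) b (a + b) (if c0 = '1' then w + a else w) fuel
    | _, _ => (0, 0)

def decodeFibonacciWord (s : String) (l : Int) : Int × Int :=
  pvLoopA s.toList l 1 2 0 (2 * s.toList.length + 2)

-- ===== PORT B =====
-- Source B's first while loop: scan for the "11" terminator (short-circuit `and` as in Source B);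
-- none = Python raises IndexError (excluded by Pre_)
def pvScanB (cs : List Char) (j : Int) : Nat → Option Int
  | 0 => none
  | fuel + 1 =>
    match PySem.List.pyGet? cs j with
    | none => none
    | some c0 =>
      if c0 = '1' then
        match PySem.List.pyGet? cs (j + 1) with
        | none => none
        | some c1 => if c1 = '1' then some j else pvScanB cs (j + 1) fuel
      else pvScanB cs (j + 1) fuel

-- Source B's second while loop: extend fibs until it has n entries (fibs[-1], fibs[-2] via
-- pyGet?; the getD 0 default is unreachable since the list always has ≥ 2 entries)
def pvFibExtend (n : Nat) (fibs : List Int) : Nat → List Int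
  | 0 => fibs
  | fuel + 1 =>
    if fibs.length < n then
      pvFibExtend n
        (fibs ++ [(PySem.List.pyGet? fibs (-1)).getD 0 + (PySem.List.pyGet? fibs (-2)).getD 0])
        fuel
    else fibs

def decodeFibonacciWord_alt (s : String) (l : Int) : Int × Int :=
  let cs := s.toList
  match pvScanB cs l (2 * cs.length + 2) with
  | none => (0, 0)   -- Python raises IndexError here; excluded by Pre_
  | some j =>
    let fibs := pvFibExtend (j - l + 1).toNat [1, 2] (j - l + 1).toNat
    let total := (PySem.List.pyRange l (j + 1) 1).foldl
      (fun acc k =>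
        if PySem.List.pyGet? cs k = some '1' then
          acc + (PySem.List.pyGet? fibs (k - l)).getD 0
        else acc) 0
    (j + 2, total)

-- ===== PRECONDITION & SPEC =====
-- Pre_ is exactly the set of inputs on which A returns: the start index is in Python's
-- index range (-len <= l, negative l reads from the end) and a "11" terminator is
-- reachable scanning forward from l; on every other input A raises IndexError.
def Pre_decodeFibonacciWord (s : String) (l : Int) : Prop :=
  -(s.toList.length : Int) ≤ l ∧ ∃ c ∈ List.range (2 * s.toList.length),
    PySem.List.pyGet? s.toList (l + (c : Int)) = some '1' ∧
    PySem.List.pyGet? s.toList (l + (c : Int) + 1) = some '1'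
instance (s : String) (l : Int) : Decidable (Pre_decodeFibonacciWord s l) := by
  unfold Pre_decodeFibonacciWord; infer_instance

def pvWitness_decodeFibonacciWord : String × Int := ("0111", 0)

def Spec_decodeFibonacciWord (s : String) (l : Int) (out : Int × Int) : Prop :=
  out = decodeFibonacciWord_alt s l
instance (s : String) (l : Int) (out : Int × Int) : Decidable (Spec_decodeFibonacciWord s l out) := by
  unfold Spec_decodeFibonacciWord; infer_instance

-- ===== CLAIM (what is proved, stated in full; the proofs are below) =====
def Claim_equal_decodeFibonacciWord : Prop :=
  ∀ (s : String) (l : Int), Dom_decodeFibonacciWord s l → Pre_decodeFibonacciWord s l →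
    Spec_decodeFibonacciWord s l (decodeFibonacciWord s l)

-- ===== LEMMAS AND PROOFS =====

-- the Fibonacci weights 1, 2, 3, 5, … (proof-side characterisation)
def pvFb : Nat → Int
  | 0 => 1
  | 1 => 2
  | n + 2 => pvFb n + pvFb (n + 1)

-- the common value both programs compute: sum of pvFb weights over the '1' positions
def pvS (cs : List Char) : Int → Nat → Nat → Int
  | _, _, 0 => 0
  | l, m, cnt + 1 =>
    (if PySem.List.pyGet? cs l = some '1' then pvFb m else 0) + pvS cs (l + 1) (m + 1) cnt

lemma pvGet_some_bounds {xs : List Char} {i : Int} {x : Char}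
    (h : PySem.List.pyGet? xs i = some x) : -(xs.length : Int) ≤ i ∧ i < xs.length := by
  by_contra hc
  have : PySem.List.pyGet? xs i = none := by
    rw [PySem.List.pyGet?_eq_none_iff]
    intro hr
    exact hc (by simpa [PySem.Raise.InRange] using hr)
  simp [this] at h

lemma pvGet_some_of_lt {xs : List Char} {i : Int} (h0 : -(xs.length : Int) ≤ i)
    (h1 : i < xs.length) : ∃ c, PySem.List.pyGet? xs i = some c := by
  cases h : PySem.List.pyGet? xs i with
  | some c => exact ⟨c, rfl⟩
  | none =>
    rw [PySem.List.pyGet?_eq_none_iff] at h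
    exact absurd (by simp only [PySem.Raise.InRange]; omega) h

-- A's loop computes l + cnt + 2 and the weighted sum, where cnt is the offset of the
-- first terminator
lemma pvLoopA_eq (cs : List Char) :
    ∀ (cnt fuel : Nat) (l : Int) (m : Nat) (w : Int), -(cs.length : Int) ≤ l → cnt < fuel →
    (∀ i : Nat, i < cnt →
      ¬ (PySem.List.pyGet? cs (l + i) = some '1' ∧ PySem.List.pyGet? cs (l + i + 1) = some '1')) →
    PySem.List.pyGet? cs (l + cnt) = some '1' →
    PySem.List.pyGet? cs (l + cnt + 1) = some '1' →
    pvLoopA cs l (pvFb m) (pvFb (m + 1)) w fuel = (l + cnt + 2, w + pvS cs l m (cnt + 1)) := by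
  intro cnt
  induction cnt with
  | zero =>
    intro fuel l m w hl hf _ h0 h1
    obtain ⟨fuel, rfl⟩ : ∃ f, fuel = f + 1 := ⟨fuel - 1, by omega⟩
    simp only [Int.natCast_zero, add_zero] at h0 h1
    simp [pvLoopA, h0, h1, pvS]
  | succ cnt ih =>
    intro fuel l m w hl hf hmin h0 h1
    obtain ⟨fuel, rfl⟩ : ∃ f, fuel = f + 1 := ⟨fuel - 1, by omega⟩
    have hlen : l + (cnt + 1) + 1 < (cs.length : Int) := (pvGet_some_bounds h1).2
    obtain ⟨c0, hc0⟩ := pvGet_some_of_lt (xs := cs) hl (by omega)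
    obtain ⟨c1, hc1⟩ := pvGet_some_of_lt (xs := cs) (i := l + 1) (by omega)
      (by omega)
    have hnot : ¬ (c0 = c1 ∧ c0 = '1') := by
      rintro ⟨rfl, rfl⟩
      exact hmin 0 (by omega) (by simpa using ⟨hc0, hc1⟩)
    have hIH := ih fuel (l + 1) (m + 1) (if c0 = '1' then w + pvFb m else w) (by omega)
      (by omega)
      (fun i hi => by
        have h := hmin (i + 1) (by omega)
        push_cast at h ⊢
        have e1 : l + 1 + (i : Int) = l + ((i : Int) + 1) := by ring
        rw [e1]
        exact h)
      (by
        push_cast at h0 ⊢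
        have e : l + 1 + (cnt : Int) = l + ((cnt : Int) + 1) := by ring
        rw [e]; exact h0)
      (by
        push_cast at h1 ⊢
        have e : l + 1 + (cnt : Int) + 1 = l + ((cnt : Int) + 1) + 1 := by ring
        rw [e]; exact h1)
    simp only [pvLoopA, hc0, hc1, if_neg hnot]
    have hfb : pvFb m + pvFb (m + 1) = pvFb (m + 2) := rfl
    rw [hfb, hIH, Prod.mk.injEq]
    refine ⟨by push_cast; ring, ?_⟩
    simp only [pvS, hc0, Option.some.injEq]
    split_ifs with h <;> ring
-- B's scan finds the same first terminator
lemma pvScanB_eq (cs : List Char) :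
    ∀ (cnt fuel : Nat) (l : Int), -(cs.length : Int) ≤ l → cnt < fuel →
    (∀ i : Nat, i < cnt →
      ¬ (PySem.List.pyGet? cs (l + i) = some '1' ∧ PySem.List.pyGet? cs (l + i + 1) = some '1')) →
    PySem.List.pyGet? cs (l + cnt) = some '1' →
    PySem.List.pyGet? cs (l + cnt + 1) = some '1' →
    pvScanB cs l fuel = some (l + cnt) := by
  intro cnt
  induction cnt with
  | zero =>
    intro fuel l hl hf _ h0 h1
    obtain ⟨fuel, rfl⟩ : ∃ f, fuel = f + 1 := ⟨fuel - 1, by omega⟩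
    simp only [Int.natCast_zero, add_zero] at h0 h1
    simp [pvScanB, h0, h1]
  | succ cnt ih =>
    intro fuel l hl hf hmin h0 h1
    obtain ⟨fuel, rfl⟩ : ∃ f, fuel = f + 1 := ⟨fuel - 1, by omega⟩
    have hlen : l + (cnt + 1) + 1 < (cs.length : Int) := (pvGet_some_bounds h1).2
    obtain ⟨c0, hc0⟩ := pvGet_some_of_lt (xs := cs) hl (by omega)
    obtain ⟨c1, hc1⟩ := pvGet_some_of_lt (xs := cs) (i := l + 1) (by omega)
      (by omega)
    have hIH := ih fuel (l + 1) (by omega) (by omega)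
      (fun i hi => by
        have h := hmin (i + 1) (by omega)
        push_cast at h ⊢
        have e1 : l + 1 + (i : Int) = l + ((i : Int) + 1) := by ring
        rw [e1]
        exact h)
      (by
        push_cast at h0 ⊢
        have e : l + 1 + (cnt : Int) = l + ((cnt : Int) + 1) := by ring
        rw [e]; exact h0)
      (by
        push_cast at h1 ⊢
        have e : l + 1 + (cnt : Int) + 1 = l + ((cnt : Int) + 1) + 1 := by ring
        rw [e]; exact h1)
    have hgoal : l + 1 + (cnt : Int) = l + (cnt + 1 : Nat) := by push_cast; ring
    have hnot : ¬ (c0 = '1' ∧ c1 = '1') := by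
      rintro ⟨rfl, rfl⟩
      exact hmin 0 (by omega) (by simpa using ⟨hc0, hc1⟩)
    simp only [pvScanB, hc0, hc1]
    by_cases h : c0 = '1'
    · have : ¬ c1 = '1' := fun hh => hnot ⟨h, hh⟩
      simp [h, this, hIH, hgoal]
    · simp [h, hIH, hgoal]

-- the fibs table Source B builds is exactly the first max k n values of pvFb
lemma pvFibExtend_eq (n : Nat) :
    ∀ (fuel k : Nat), 2 ≤ k → max k n ≤ k + fuel →
    pvFibExtend n ((List.range k).map pvFb) fuel = (List.range (max k n)).map pvFb := by
  intro fuel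
  induction fuel with
  | zero =>
    intro k hk hle
    have : max k n = k := by omega
    simp [pvFibExtend, this]
  | succ fuel ih =>
    intro k hk hle
    obtain ⟨m, rfl⟩ : ∃ m, k = m + 2 := ⟨k - 2, by omega⟩
    by_cases h : m + 2 < n
    · have hlen : ((List.range (m + 2)).map pvFb).length < n := by simpa using h
      have hlast : PySem.List.pyGet? ((List.range (m + 2)).map pvFb) (-1)
          = some (pvFb (m + 1)) := by
        rw [PySem.List.pyGet?_neg_ofNat _ 1 (by omega) (by simp)]
        simp
      have hlast2 : PySem.List.pyGet? ((List.range (m + 2)).map pvFb) (-2)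
          = some (pvFb m) := by
        rw [PySem.List.pyGet?_neg_ofNat _ 2 (by omega) (by simp)]
        simp
      have happ : (List.range (m + 2)).map pvFb ++ [pvFb (m + 1) + pvFb m]
          = (List.range (m + 3)).map pvFb := by
        have : pvFb (m + 1) + pvFb m = pvFb (m + 2) := by
          show _ = pvFb m + pvFb (m + 1); ring
        rw [this]
        simp [List.range_succ]
      simp only [pvFibExtend, if_pos hlen, hlast, hlast2, Option.getD_some, happ]
      rw [ih (m + 3) (by omega) (by omega)]
      have hmax : max (m + 3) n = max (m + 2) n := by omega
      rw [hmax]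
    · have hlen : ¬ ((List.range (m + 2)).map pvFb).length < n := by simpa using h
      have hmax : max (m + 2) n = m + 2 := by omega
      rw [hmax]
      simp only [pvFibExtend, if_neg hlen]

lemma pvTableLookup (N t : Nat) (ht : t < N) :
    PySem.List.pyGet? ((List.range N).map pvFb) (t : Int) = some (pvFb t) := by
  rw [PySem.List.pyGet?_natCast]
  simp [ht]

-- Source B's sum over range(l, j+1) equals the weighted sum pvS
lemma pvFold_eq (cs : List Char) (N : Nat) (l0 : Int) :
    ∀ (cnt t : Nat) (acc : Int), t + cnt ≤ N →
    (PySem.List.pyRange (l0 + (t : Int)) (l0 + (t : Int) + (cnt : Int)) 1).foldl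
      (fun acc k =>
        if PySem.List.pyGet? cs k = some '1' then
          acc + (PySem.List.pyGet? ((List.range N).map pvFb) (k - l0)).getD 0
        else acc) acc
    = acc + pvS cs (l0 + (t : Int)) t cnt := by
  intro cnt
  induction cnt with
  | zero =>
    intro t acc _
    rw [PySem.List.pyRange_one_eq_nil (by omega)]
    simp [pvS]
  | succ cnt ih =>
    intro t acc hN
    rw [PySem.List.pyRange_one_cons (by push_cast; omega)]
    simp only [List.foldl_cons]
    have hb1 : l0 + (t : Int) + 1 = l0 + ((t + 1 : Nat) : Int) := by push_cast; ring
    have hb2 : l0 + (t : Int) + ((cnt + 1 : Nat) : Int) = l0 + ((t + 1 : Nat) : Int) + (cnt : Int) := by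
      push_cast; ring
    rw [hb1, hb2, ih (t + 1) _ (by omega)]
    have hidx : l0 + (t : Int) - l0 = (t : Int) := by ring
    rw [hidx, pvTableLookup N t (by omega)]
    show _ = acc + pvS cs (l0 + (t : Int)) t (cnt + 1)
    simp only [pvS, Option.getD_some, ← hb1]
    split_ifs with h <;> ring

-- ===== VERDICT (by name: the statement is the Claim_ definition above) =====
theorem decodeFibonacciWord_spec : Claim_equal_decodeFibonacciWord := by
  intro s l hDom hPre
  obtain ⟨hl, c, _, hcond⟩ := hPre
  set cs := s.toList with hcs
  -- the predicate "terminator at offset i from l"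
  have hex : ∃ i : Nat,
      PySem.List.pyGet? cs (l + i) = some '1' ∧ PySem.List.pyGet? cs (l + i + 1) = some '1' :=
    ⟨c, hcond⟩
  classical
  set cnt := Nat.find hex with hcnt
  obtain ⟨h0, h1⟩ := Nat.find_spec hex
  have hmin : ∀ i : Nat, i < cnt →
      ¬ (PySem.List.pyGet? cs (l + i) = some '1' ∧ PySem.List.pyGet? cs (l + i + 1) = some '1') :=
    fun i hi => Nat.find_min hex hi
  have hlen : l + (cnt : Int) + 1 < (cs.length : Int) := (pvGet_some_bounds h1).2
  have hfuel : cnt < 2 * cs.length + 2 := by omega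
  -- A's side
  have hA : decodeFibonacciWord s l = (l + cnt + 2, 0 + pvS cs l 0 (cnt + 1)) := by
    have := pvLoopA_eq cs cnt (2 * cs.length + 2) l 0 0 hl hfuel hmin h0 h1
    simpa [decodeFibonacciWord, pvFb] using this
  -- B's side
  have hscan : pvScanB cs l (2 * cs.length + 2) = some (l + cnt) :=
    pvScanB_eq cs cnt (2 * cs.length + 2) l hl hfuel hmin h0 h1
  have hn : (l + (cnt : Int) - l + 1).toNat = cnt + 1 := by omega
  have htable : pvFibExtend (cnt + 1) [1, 2] (cnt + 1)
      = (List.range (max 2 (cnt + 1))).map pvFb := by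
    have hinit : ([1, 2] : List Int) = (List.range 2).map pvFb := by decide
    rw [hinit]
    exact pvFibExtend_eq (cnt + 1) (cnt + 1) 2 (by omega) (by omega)
  have hB : decodeFibonacciWord_alt s l = (l + cnt + 2, 0 + pvS cs l 0 (cnt + 1)) := by
    simp only [decodeFibonacciWord_alt, ← hcs, hscan, hn, htable]
    have hfold := pvFold_eq cs (max 2 (cnt + 1)) l (cnt + 1) 0 0 (by omega)
    simp only [Int.natCast_zero, add_zero, Int.natCast_add, Int.natCast_one] at hfold
    have hrange : l + (cnt : Int) + 1 = l + ((cnt : Int) + 1) := by ring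
    rw [hrange, hfold]
  show decodeFibonacciWord s l = decodeFibonacciWord_alt s l
  rw [hA, hB]
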